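-- pv_equiv track=rewrite | github.com/dmitriykyc/GeekBrain_Algorithm | Lesson_2/lesson2_task5.py | return_ascii
-- ===== SOURCE A (Python) =====
-- def refactor_text(ell):
--     if ell < 100:
--         ell_to_text = ' ' + str(ell)
--     else:
--         ell_to_text = ell
--     return ell_to_text
--
-- def return_ascii(ell=32, result='', step=0):
--     if ell == 128:
--         return result
--     else:
--         if step == 10:
--             result += '\n'
--             step = -1
--         else:
--             result += f' | {refactor_text(ell)} - "{chr(ell)}"'
--     return return_ascii(ell + 1, result, step + 1)
-- ===== SOURCE B (Python) =====
-- def return_ascii(ell=32, result='', step=0):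
--     parts = [result]
--     for n in range(ell, 128):
--         if step == 10:
--             parts.append('\n')
--             step = -1
--         else:
--             num = str(n) if n >= 100 else f' {n}'
--             parts.append(f' | {num} - "{chr(n)}"')
--         step += 1
--     return ''.join(parts)
-- ===== Notes on version B (the rewrite author's own statement) =====
-- stated objective: idiomatic
-- what changed: Replaces A's tail recursion that rebuilds the accumulator string on every call by an iterative for-loop over range(ell, 128) that collects pieces in a list and joins them once at the end; Pre_ excludes ell > 128 and negative-code starts (where A raises RecursionError/ValueError and B raises too or loops).
import Mathlib
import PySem

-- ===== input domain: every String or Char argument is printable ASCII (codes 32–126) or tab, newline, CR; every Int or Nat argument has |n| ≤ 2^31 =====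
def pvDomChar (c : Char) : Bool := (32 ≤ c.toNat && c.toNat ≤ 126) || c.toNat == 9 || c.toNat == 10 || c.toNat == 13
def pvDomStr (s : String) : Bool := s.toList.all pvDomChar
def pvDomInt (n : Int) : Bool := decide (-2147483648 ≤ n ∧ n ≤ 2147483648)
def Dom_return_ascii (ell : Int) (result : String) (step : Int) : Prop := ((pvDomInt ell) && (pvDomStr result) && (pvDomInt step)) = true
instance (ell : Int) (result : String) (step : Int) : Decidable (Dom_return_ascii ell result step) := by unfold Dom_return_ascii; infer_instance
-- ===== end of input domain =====

-- B replaces A's tail recursion (quadratic string concatenation) by an iterative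
-- for-loop over range(ell, 128) collecting pieces in a list joined once at the end.

-- ===== PORT A =====
-- helper refactor_text: the f-string renders the int branch via str, so both branches are strings
def refactor_text (ell : Int) : String :=
  if ell < 100 then " " ++ PySem.Int.toStr ell else PySem.Int.toStr ell

-- chr(ell) ported as Char.ofNat ell.toNat: exact for 0 ≤ ell ≤ 127, all that Pre_ admits
-- fuel makes the Python recursion total; (129 - ell).toNat suffices on Pre_ (128 - ell calls)
def pvGoA : Nat → Int → String → Int → String
  | 0, _, result, _ => result
  | fuel + 1, ell, result, step =>
    if ell == 128 then result
    else if step == 10 then pvGoA fuel (ell + 1) (result ++ "\n") (-1 + 1)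
    else pvGoA fuel (ell + 1)
      (result ++ " | " ++ refactor_text ell ++ " - \"" ++ String.singleton (Char.ofNat ell.toNat) ++ "\"")
      (step + 1)

def return_ascii (ell : Int) (result : String) (step : Int) : String :=
  pvGoA (129 - ell).toNat ell result step

-- ===== PORT B =====
-- loop body of B: appends one piece to parts and updates step
def pvStepB (st : List String × Int) (n : Int) : List String × Int :=
  if st.2 == 10 then (st.1 ++ ["\n"], -1 + 1)
  else (st.1 ++ [" | " ++ (if 100 ≤ n then PySem.Int.toStr n else " " ++ PySem.Int.toStr n)
                  ++ " - \"" ++ String.singleton (Char.ofNat n.toNat) ++ "\""], st.2 + 1)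

def return_ascii_alt (ell : Int) (result : String) (step : Int) : String :=
  PySem.Str.join "" ((PySem.List.pyRange ell 128 1).foldl pvStepB ([result], step)).1

-- ===== PRECONDITION & SPEC =====
-- Pre_: exactly the inputs on which the Python A returns: the recursion must reach 128
-- (so ell ≤ 128) and chr(ell) must never be called on a negative code — which leaves
-- 0 ≤ ell, plus the input ell = -1 ∧ step = 10 whose first iteration skips chr.
def Pre_return_ascii (ell : Int) (result : String) (step : Int) : Prop :=
  (0 ≤ ell ∧ ell ≤ 128) ∨ (ell = -1 ∧ step = 10)
instance (ell : Int) (result : String) (step : Int) : Decidable (Pre_return_ascii ell result step) := by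
  unfold Pre_return_ascii; infer_instance

def pvWitness_return_ascii : Int × String × Int := (32, "", 0)

def Spec_return_ascii (ell : Int) (result : String) (step : Int) (out : String) : Prop := out = return_ascii_alt ell result step
instance (ell : Int) (result : String) (step : Int) (out : String) : Decidable (Spec_return_ascii ell result step out) := by unfold Spec_return_ascii; infer_instance

-- ===== CLAIM =====
def Claim_equal_return_ascii : Prop := ∀ (ell : Int) (result : String) (step : Int), Dom_return_ascii ell result step → Pre_return_ascii ell result step → Spec_return_ascii ell result step (return_ascii ell result step)

-- ===== LEMMAS AND PROOFS =====

-- the entry piece B appends for code n (proof-side abbreviation)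
def pvPieceB (n : Int) : String :=
  " | " ++ (if 100 ≤ n then PySem.Int.toStr n else " " ++ PySem.Int.toStr n)
    ++ " - \"" ++ String.singleton (Char.ofNat n.toNat) ++ "\""

theorem pvStepB_eq10 (ps : List String) (n : Int) :
    pvStepB (ps, 10) n = (ps ++ ["\n"], -1 + 1) := by
  simp [pvStepB]

theorem pvStepB_ne10 (ps : List String) (s n : Int) (hs : s ≠ 10) :
    pvStepB (ps, s) n = (ps ++ [pvPieceB n], s + 1) := by
  simp [pvStepB, pvPieceB, hs]

-- ''.join peels its head
theorem pv_join_cons (p : String) (ps : List String) :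
    PySem.Str.join "" (p :: ps) = p ++ PySem.Str.join "" ps := by
  apply String.toList_injective
  rw [String.toList_append, PySem.Str.toList_join, PySem.Str.toList_join]
  cases ps with
  | nil => simp [PySem.Chars.join_singleton, PySem.Chars.join_nil]
  | cons q rest =>
    have h : ("" : String).toList = [] := rfl
    rw [h, List.map_cons, List.map_cons, PySem.Chars.join_cons_cons]
    simp

-- B's fold only appends to the parts list; the appended tail depends only on step and ns
theorem pv_fold_state (ns : List Int) : ∀ (init : List String) (s : Int),
    ns.foldl pvStepB (init, s)
      = (init ++ (ns.foldl pvStepB ([], s)).1, (ns.foldl pvStepB ([], s)).2) := by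
  induction ns with
  | nil => intro init s; simp
  | cons n t ih =>
    intro init s
    rw [List.foldl_cons, List.foldl_cons]
    by_cases hs : s = 10
    · subst hs
      rw [pvStepB_eq10, pvStepB_eq10]
      simp only [List.nil_append]
      rw [ih (init ++ ["\n"]), ih ["\n"]]
      simp
    · rw [pvStepB_ne10 _ _ _ hs, pvStepB_ne10 _ _ _ hs]
      simp only [List.nil_append]
      rw [ih (init ++ [pvPieceB n]), ih [pvPieceB n]]
      simp

-- merging the first two pieces of the initial parts list does not change the join
theorem pv_alt_init (ell : Int) (r p : String) (s : Int) :
    PySem.Str.join "" ((PySem.List.pyRange ell 128 1).foldl pvStepB ([r, p], s)).1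
      = PySem.Str.join "" ((PySem.List.pyRange ell 128 1).foldl pvStepB ([r ++ p], s)).1 := by
  rw [pv_fold_state _ [r, p], pv_fold_state _ [r ++ p]]
  simp only [List.cons_append, List.nil_append, pv_join_cons]
  rw [String.append_assoc]

theorem pv_alt_128 (r : String) (step : Int) : return_ascii_alt 128 r step = r := by
  unfold return_ascii_alt
  rw [PySem.List.pyRange_one_eq_nil (le_refl 128)]
  simp [PySem.Str.join, PySem.Chars.join_singleton]

-- peel one loop iteration when ell < 128, step = 10
theorem pv_alt_peel_nl (ell : Int) (r : String) (h : ell < 128) :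
    return_ascii_alt ell r 10 = return_ascii_alt (ell + 1) (r ++ "\n") 0 := by
  unfold return_ascii_alt
  rw [PySem.List.pyRange_one_cons h, List.foldl_cons, pvStepB_eq10,
    (show (-1 : Int) + 1 = 0 by norm_num)]
  exact pv_alt_init (ell + 1) r "\n" 0

-- peel one loop iteration when ell < 128, step ≠ 10
theorem pv_alt_peel_entry (ell step : Int) (r : String) (h : ell < 128) (hs : step ≠ 10) :
    return_ascii_alt ell r step
      = return_ascii_alt (ell + 1) (r ++ pvPieceB ell) (step + 1) := by
  unfold return_ascii_alt
  rw [PySem.List.pyRange_one_cons h, List.foldl_cons, pvStepB_ne10 _ _ _ hs]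
  exact pv_alt_init (ell + 1) r (pvPieceB ell) (step + 1)

-- A's entry string equals B's piece
theorem pv_entry_eq (ell : Int) :
    " | " ++ refactor_text ell ++ " - \"" ++ String.singleton (Char.ofNat ell.toNat) ++ "\""
      = pvPieceB ell := by
  unfold refactor_text pvPieceB
  split_ifs with h1 h2 h2 <;> first | rfl | omega

-- main induction: with enough fuel, A's recursion equals B's loop for every start state
theorem pv_main (n : Nat) : ∀ (ell : Int) (r : String) (step : Int), ell = 128 - (n : Int) →
    pvGoA (n + 1) ell r step = return_ascii_alt ell r step := by
  induction n with
  | zero =>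
    intro ell r step h
    norm_num at h; subst h
    simp only [pvGoA, if_pos (by rfl : ((128:Int) == 128) = true)]
    exact (pv_alt_128 r step).symm
  | succ m ih =>
    intro ell r step h
    have hlt : ell < 128 := by omega
    rw [pvGoA]
    rw [if_neg (by simp only [beq_iff_eq]; omega)]
    by_cases hs : step = 10
    · subst hs
      rw [if_pos (by rfl)]
      rw [ih (ell + 1) _ _ (by omega)]
      rw [(show (-1 : Int) + 1 = 0 by norm_num)]
      exact (pv_alt_peel_nl ell r hlt).symm
    · rw [if_neg (by simp only [beq_iff_eq]; exact hs)]
      rw [ih (ell + 1) _ _ (by omega)]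
      rw [pv_alt_peel_entry ell step r hlt hs]
      congr 1
      rw [← pv_entry_eq ell]
      apply String.toList_injective
      simp

-- ===== VERDICT =====
theorem return_ascii_spec : Claim_equal_return_ascii := by
  intro ell r step _ hp
  unfold Spec_return_ascii return_ascii
  have hle : ell ≤ 128 := by unfold Pre_return_ascii at hp; omega
  have h129 : (129 - ell).toNat = (128 - ell).toNat + 1 := by omega
  rw [h129]
  exact pv_main (128 - ell).toNat ell r step (by omega)
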